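-- pv_equiv track=rewrite | github.com/yfussy/Grader | Python/Part-III/Part-III-Ascii-Text.py | strip
-- ===== SOURCE A (Python) =====
-- def rotate(l, dir):
--     # 1:cw -1:ccw
--     return [''.join(t) for t in list(zip(*l[::-dir]))[::dir]]
--
-- def strip(l, dir, full=False):
--     # 1:left -1:right
--     l = rotate(l, dir)
--     i = 0
--     for _ in range(len(l[:])):
--         if all(t == '.' for t in l[i]):
--             l.pop(i)
--             continue
--         if not full:
--             break
--         i += 1
--     return rotate(l, -dir)
-- ===== SOURCE B (Python) =====
-- def strip(l, dir, full=False):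
--     # same rotate/strip/unrotate plan, but with explicit index arithmetic and
--     # comprehension-style stripping instead of slice/zip juggling and an in-place pop loop
--     def sub(rows, step):
--         # rows[::step], written with an explicit index range
--         n = len(rows)
--         idx = range(0, n, step) if step > 0 else range(n - 1, -1, step)
--         return [rows[i] for i in idx]
--
--     def rot(rows, d):
--         flipped = sub(rows, -d)
--         if not flipped:
--             return []
--         w = min(len(r) for r in flipped)
--         return sub([''.join(r[j] for r in flipped) for j in range(w)], d)
--
--     g = rot(l, dir)
--     if full:
--         g = [r for r in g if not all(c == '.' for c in r)]
--     else:
--         k = 0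
--         while k < len(g) and all(c == '.' for c in g[k]):
--             k += 1
--         g = g[k:]
--     return rot(g, -dir)
-- ===== Notes on version B (the rewrite author's own statement) =====
-- stated objective: alternative
-- what changed: B keeps the rotate/strip/unrotate plan but computes each rotation with explicit index ranges and a transpose comprehension instead of the reverse-slice/zip/stride-slice pipeline, and strips the all-dot rows with a filter comprehension / leading-run count instead of the in-place pop loop over a mutating index.
import Mathlib
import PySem

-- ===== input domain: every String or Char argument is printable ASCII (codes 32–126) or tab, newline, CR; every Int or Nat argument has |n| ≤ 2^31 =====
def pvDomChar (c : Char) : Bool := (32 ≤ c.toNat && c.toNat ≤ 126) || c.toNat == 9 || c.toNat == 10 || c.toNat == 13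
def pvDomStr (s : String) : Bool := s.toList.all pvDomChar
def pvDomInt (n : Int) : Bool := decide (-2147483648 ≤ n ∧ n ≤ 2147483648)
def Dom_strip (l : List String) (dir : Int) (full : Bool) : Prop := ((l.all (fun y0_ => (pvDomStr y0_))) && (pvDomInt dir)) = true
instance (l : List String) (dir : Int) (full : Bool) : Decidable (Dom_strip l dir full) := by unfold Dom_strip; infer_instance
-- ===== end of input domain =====

-- B keeps the rotate/strip/unrotate plan but replaces the slice/zip pipeline by explicit index
-- arithmetic and a transpose comprehension, and the in-place pop loop by filter / leading-run drop.

-- ===== PORT A =====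
-- all(t == '.' for t in row)
def pyAllDot (s : List Char) : Bool := s.all (fun t => t = '.')

-- exact hand port of zip(*rows): for each j below the minimum row length, the tuple of every row's j-th element
def pyTransp (rows : List (List Char)) : List (List Char) :=
  match (rows.map List.length).min? with
  | none => []
  | some w => (List.range w).map (fun j => rows.map (fun r => r.getD j ' '))

-- rotate(l, dir) = [''.join(t) for t in list(zip(*l[::-dir]))[::dir]]
def pyRotate (l : List String) (dir : Int) : List String :=
  ((PySem.List.slice? (pyTransp (((PySem.List.slice? l none none (-dir)).getD []).map String.toList))
      none none dir).getD []).map String.ofList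

-- the for-loop of strip: n remaining iterations, l the mutated list, i the index
def stripLoop (n : Nat) (l : List String) (i : Nat) (full : Bool) : List String :=
  match n with
  | 0 => l
  | n + 1 =>
    match PySem.List.pyGet? l (i : Int) with
    | none => l        -- IndexError: unreachable (the pops never outrun the iterations)
    | some row =>
      if pyAllDot row.toList then stripLoop n (l.eraseIdx i) i full
      else if full then stripLoop n l (i + 1) full
      else l           -- break

def strip (l : List String) (dir : Int) (full : Bool) : List String :=
  let l1 := pyRotate l dir
  pyRotate (stripLoop l1.length l1 0 full) (-dir)

-- ===== PORT B =====
-- range(0, n, step) / range(n-1, -1, step): the explicit index range of rows[::step]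
def subIdx (n : Nat) (step : Int) : List Int :=
  if step > 0 then PySem.List.pyRange 0 n step else PySem.List.pyRange ((n : Int) - 1) (-1) step

-- [rows[i] for i in idx]; every produced index lies in [0, n), so getD is exact for rows[i]
def subList {α : Type} (rows : List α) (step : Int) (dflt : α) : List α :=
  (subIdx rows.length step).map (fun i => rows.getD i.toNat dflt)

def rotB (rows : List String) (d : Int) : List String :=
  let flipped := subList rows (-d) ""
  if flipped = [] then []
  else
    let w := ((flipped.map (fun r => r.toList.length)).min?).getD 0
    subList ((List.range w).map (fun j => String.ofList (flipped.map (fun r => r.toList.getD j ' ')))) d ""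

-- the while loop: how many leading rows are entirely '.'
def countLead (g : List String) : Nat :=
  match g with
  | [] => 0
  | r :: t => if r.toList.all (fun c => c = '.') then countLead t + 1 else 0

def strip_alt (l : List String) (dir : Int) (full : Bool) : List String :=
  let g := rotB l dir
  let g2 := if full then g.filter (fun r => !(r.toList.all (fun c => c = '.')))
            else g.drop (countLead g)
  rotB g2 (-dir)

-- ===== PRECONDITION & SPEC =====
-- dir = 0 makes A raise ValueError ('slice step cannot be zero'); everything else returns.
def Pre_strip (l : List String) (dir : Int) (full : Bool) : Prop := dir ≠ 0
instance (l : List String) (dir : Int) (full : Bool) : Decidable (Pre_strip l dir full) := by unfold Pre_strip; infer_instance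

def pvWitness_strip : List String × Int × Bool := ([".ab.", ".cd."], 1, false)

def Spec_strip (l : List String) (dir : Int) (full : Bool) (out : List String) : Prop := out = strip_alt l dir full
instance (l : List String) (dir : Int) (full : Bool) (out : List String) : Decidable (Spec_strip l dir full out) := by unfold Spec_strip; infer_instance

-- ===== CLAIM (what is proved, stated in full; the proofs are below) =====
def Claim_equal_strip : Prop := ∀ (l : List String) (dir : Int) (full : Bool), Dom_strip l dir full → Pre_strip l dir full → Spec_strip l dir full (strip l dir full)

-- ===== LEMMAS AND PROOFS =====

theorem mul_bound (u k n : Int) (hu : 0 < u) (hkc : k < (n + u - 1) / u) : u * k ≤ n - 1 := by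
  have h1 : ((n + u - 1) / u) * u ≤ n + u - 1 := Int.ediv_mul_le _ (by omega)
  have h2 : (k + 1) * u ≤ ((n + u - 1) / u) * u := by
    apply mul_le_mul_of_nonneg_right (by omega) (by omega)
  nlinarith

-- B's explicit index range computes exactly xs[::t]
theorem subList_eq_slice {α : Type} (xs : List α) (t : Int) (ht : t ≠ 0) (dflt : α) :
    subList xs t dflt = (PySem.List.slice? xs none none t).getD [] := by
  rcases lt_or_gt_of_ne ht with hneg | hpos
  · unfold subList subIdx
    rw [if_neg (by omega)]
    simp only [PySem.List.slice?, PySem.List.sliceIndices, PySem.List.pyRange,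
      if_neg ht, if_neg (by omega : ¬ (0:Int) < t), if_pos (by omega : t < 0)]
    simp only [List.map_map, Option.getD_some]
    symm
    rw [List.filterMap_eq_map_iff_forall_eq_some]
    intro k hk
    rw [List.mem_range] at hk
    split at hk
    case isFalse => omega
    case isTrue h0 =>
      have hkc : ((k:Int)) < ((xs.length:Int) - 1 - -1 + -t - 1) / -t := by
        have := hk
        omega
      have hb : -t * (k:Int) ≤ (xs.length:Int) - 1 := by
        rw [show ((xs.length:Int) - 1 - -1 + -t - 1) = (xs.length:Int) + -t - 1 by ring] at hkc
        exact mul_bound (-t) k (xs.length) (by omega) hkc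
      rw [neg_mul] at hb
      have hd : t * (k:Int) ≤ 0 := mul_nonpos_of_nonpos_of_nonneg (le_of_lt hneg) (Int.natCast_nonneg k)
      have hidx : ((xs.length:Int) - 1 + t * (k:Int)).toNat < xs.length := by omega
      rw [List.getElem?_eq_getElem hidx]
      simp only [Function.comp]
      rw [List.getD_eq_getElem _ _ hidx]
  · unfold subList subIdx
    rw [if_pos hpos]
    simp only [PySem.List.slice?, PySem.List.sliceIndices, PySem.List.pyRange,
      if_neg ht, if_pos hpos, if_neg (by omega : ¬ t < 0)]
    simp only [List.map_map, Option.getD_some]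
    symm
    rw [List.filterMap_eq_map_iff_forall_eq_some]
    intro k hk
    rw [List.mem_range] at hk
    split at hk
    case isFalse => omega
    case isTrue h0 =>
      have hkc : ((k:Int)) < ((xs.length:Int) - 0 + t - 1) / t := by
        have := hk
        omega
      have hb : t * (k:Int) ≤ (xs.length:Int) - 1 := by
        rw [show ((xs.length:Int) - 0 + t - 1) = (xs.length:Int) + t - 1 by ring] at hkc
        exact mul_bound t k (xs.length) (by omega) hkc
      have hidx : ((0:Int) + t * (k:Int)).toNat < xs.length := by
        have : (0:Int) ≤ t * k := mul_nonneg (by omega) (by omega)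
        omega
      rw [List.getElem?_eq_getElem hidx]
      simp only [Function.comp]
      rw [List.getD_eq_getElem _ _ hidx]

theorem slice?_map {α β : Type} (f : α → β) (xs : List α) (s? e? : Option Int) (st : Int) :
    PySem.List.slice? (xs.map f) s? e? st = Option.map (List.map f) (PySem.List.slice? xs s? e? st) := by
  by_cases h : st = 0
  · simp [PySem.List.slice?, h]
  · simp only [PySem.List.slice?, if_neg h, List.length_map, Option.map_some]
    congr 1
    simp only [List.getElem?_map, List.map_filterMap]

theorem slice?_nil {α : Type} (st : Int) (h : st ≠ 0) :
    PySem.List.slice? ([] : List α) none none st = some [] := by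
  simp [PySem.List.slice?, PySem.List.sliceIndices, h]

-- B's rot computes exactly A's rotate
theorem rotB_eq (rows : List String) (d : Int) (hd : d ≠ 0) : rotB rows d = pyRotate rows d := by
  unfold rotB pyRotate
  rw [subList_eq_slice rows (-d) (by omega) ""]
  by_cases hfe : (PySem.List.slice? rows none none (-d)).getD [] = []
  · rw [if_pos hfe, hfe]
    have h1 : pyTransp (([] : List String).map String.toList) = [] := rfl
    rw [h1, slice?_nil d hd]
    rfl
  · rw [if_neg hfe]
    set flipped := (PySem.List.slice? rows none none (-d)).getD [] with hf
    set w := ((flipped.map (fun r => r.toList.length)).min?).getD 0 with hw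
    have hml : (flipped.map String.toList).map List.length = flipped.map (fun r => r.toList.length) := by
      rw [List.map_map]; rfl
    have hmin : ((flipped.map String.toList).map List.length).min? = some w := by
      rw [hml]
      cases hmm : (flipped.map (fun r => r.toList.length)).min? with
      | none =>
        rw [List.min?_eq_none_iff] at hmm
        simp at hmm
        exact absurd hmm hfe
      | some m => rw [hw, hmm]; rfl
    rw [pyTransp, hmin]
    simp only
    rw [subList_eq_slice _ d hd ""]
    have hY : ((List.range w).map (fun j => String.ofList (flipped.map (fun r => r.toList.getD j ' '))))
        = ((List.range w).map (fun j => (flipped.map String.toList).map (fun r => r.getD j ' '))).map String.ofList := by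
      rw [List.map_map]
      apply List.map_congr_left
      intro j _
      simp [Function.comp, List.map_map]
      rfl
    rw [hY, slice?_map]
    cases PySem.List.slice? ((List.range w).map fun j => (flipped.map String.toList).map (fun r => r.getD j ' ')) none none d <;> simp

-- loop with full=True removes exactly the all-dot rows at or after position i
theorem stripLoop_full (n : Nat) : ∀ (l : List String) (i : Nat), n + i = l.length →
    stripLoop n l i true = l.take i ++ (l.drop i).filter (fun r => !pyAllDot r.toList) := by
  induction n with
  | zero =>
    intro l i h
    simp at h
    simp [stripLoop, h]
  | succ n ih =>
    intro l i h
    have hi : i < l.length := by omega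
    rw [stripLoop, PySem.List.pyGet?_natCast, List.getElem?_eq_getElem hi]
    simp only
    by_cases hd : pyAllDot (l[i].toList) = true
    · rw [if_pos hd, ih (l.eraseIdx i) i (by rw [List.length_eraseIdx_of_lt hi]; omega)]
      rw [List.eraseIdx_eq_take_drop_succ]
      rw [List.take_append_of_le_length (by simp [List.length_take]; omega)]
      rw [List.take_take, Nat.min_self]
      rw [List.drop_append_of_le_length (by simp [List.length_take]; omega)]
      rw [← List.getElem_cons_drop hi, List.filter_cons]
      simp [hd]
    · rw [if_neg hd]
      simp only [if_true]
      rw [ih l (i+1) (by omega)]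
      conv_rhs => rw [← List.getElem_cons_drop hi, List.filter_cons]
      have ht : List.take (i+1) l = List.take i l ++ [l[i]] := by
        rw [List.take_add_one, List.getElem?_eq_getElem hi]; rfl
      rw [ht, List.append_assoc]
      simp [hd]

-- loop with full=False drops the leading all-dot rows and stops
theorem stripLoop_nofull (n : Nat) : ∀ (l : List String), n = l.length →
    stripLoop n l 0 false = l.dropWhile (fun r => pyAllDot r.toList) := by
  induction n with
  | zero => intro l h; simp [stripLoop, List.length_eq_zero_iff.mp h.symm]
  | succ n ih =>
    intro l h
    match l with
    | r :: t =>
      rw [stripLoop]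
      have hg : PySem.List.pyGet? (r :: t) ((0:Nat) : Int) = some r := by
        rw [PySem.List.pyGet?_natCast]; rfl
      rw [hg]
      simp only
      by_cases hd : pyAllDot r.toList = true
      · rw [if_pos hd]
        have he : (r :: t).eraseIdx 0 = t := rfl
        rw [he, ih t (by simpa using h)]
        simp [hd]
      · rw [if_neg hd, if_neg (by simp)]
        simp [hd]

theorem dropWhile_eq_drop_len_takeWhile {α : Type} (p : α → Bool) (l : List α) :
    l.dropWhile p = l.drop (l.takeWhile p).length := by
  induction l with
  | nil => rfl
  | cons a t ih => by_cases h : p a <;> simp [h, ih]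

theorem countLead_eq (g : List String) :
    countLead g = (g.takeWhile (fun r => r.toList.all (fun c => c = '.'))).length := by
  induction g with
  | nil => rfl
  | cons r t ih => by_cases h : r.toList.all (fun c => c = '.') <;> simp [countLead, h, ih]

-- ===== VERDICT (by name: the statement is the Claim_ definition above) =====
theorem strip_spec : Claim_equal_strip := by
  intro l dir full _ hpre
  unfold Spec_strip
  have hdir : dir ≠ 0 := hpre
  show strip l dir full = strip_alt l dir full
  simp only [strip, strip_alt]
  rw [rotB_eq l dir hdir, rotB_eq _ (-dir) (by omega)]
  cases full with
  | true =>
    simp only [if_true]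
    rw [stripLoop_full _ _ 0 (by simp)]
    simp only [List.take_zero, List.drop_zero, List.nil_append]
    rfl
  | false =>
    simp only [Bool.false_eq_true, if_false]
    rw [stripLoop_nofull _ _ rfl, dropWhile_eq_drop_len_takeWhile, countLead_eq]
    rfl
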